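-- pv_equiv track=rewrite | github.com/Sublimez72/Code_training | wordle/wordle.py | count_non_w
-- ===== SOURCE A (Python) =====
-- def count_non_w(guess, result, index):
--     letter = guess[index]
--     count = 0
--     for i, c in enumerate(result):
--         if i == index:
--             continue
--         if guess[i] == letter and c != 'w':
--             count += 1
--     return count
-- ===== SOURCE B (Python) =====
-- def count_non_w(guess, result, index):
--     letter = guess[index]
--     positions = {}
--     for i, g in enumerate(guess[:len(result)]):
--         positions.setdefault(g, []).append(i)
--     return sum(1 for i in positions.get(letter, []) if i != index and result[i] != 'w')
-- ===== Notes on version B (the rewrite author's own statement) =====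
-- stated objective: alternative
-- what changed: B builds a dict grouping each letter of guess[:len(result)] to its list of positions in one pass, then counts only over the bucket of guess[index], filtering out the excluded index and positions marked 'w' in result, instead of A's single enumerate(result) loop with an in-loop i==index skip and guess[i] comparison.
import Mathlib
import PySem

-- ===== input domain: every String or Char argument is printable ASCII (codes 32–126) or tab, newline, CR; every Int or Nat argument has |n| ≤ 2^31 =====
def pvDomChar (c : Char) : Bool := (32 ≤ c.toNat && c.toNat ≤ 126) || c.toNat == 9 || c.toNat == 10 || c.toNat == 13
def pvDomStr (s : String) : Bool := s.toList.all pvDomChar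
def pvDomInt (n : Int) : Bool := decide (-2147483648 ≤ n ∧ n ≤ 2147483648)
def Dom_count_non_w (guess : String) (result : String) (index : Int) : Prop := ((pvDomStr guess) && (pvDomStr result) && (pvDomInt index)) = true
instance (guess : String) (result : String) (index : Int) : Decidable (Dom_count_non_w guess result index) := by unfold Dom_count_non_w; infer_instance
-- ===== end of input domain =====

-- B groups the positions of each letter of guess[:len(result)] into a dict in one pass, then
-- counts only over the bucket of guess[index], filtering the excluded index and 'w' marks
-- (alternative decomposition via a hash index; same asymptotic cost).


-- ===== PORT A =====
-- letter = guess[index]; loop over enumerate(result), skip i == index,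
-- count positions with guess[i] == letter and c != 'w'.
def count_non_w (guess : String) (result : String) (index : Int) : Int :=
  match PySem.Str.pyGet? guess index with
  | none => 0            -- Python raises IndexError here (outside Pre_)
  | some letter =>
    (PySem.List.enumerate result.toList 0).foldl (fun count p =>
      if p.1 = index then count
      else
        match PySem.List.pyGet? guess.toList p.1 with
        | none => count  -- Python raises IndexError here (outside Pre_)
        | some ch => if ch = letter ∧ p.2 ≠ 'w' then count + 1 else count) 0

-- ===== PORT B =====
-- positions.setdefault(g, []).append(i) over enumerate(guess[:len(result)]) — ported value-exactly
-- as d.modify g [] (· ++ [i]) (d[g] ends as d.get(g, []) + [i]) — then sum over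
-- positions.get(letter, []) filtering i != index and result[i] != 'w'.
def count_non_w_alt (guess : String) (result : String) (index : Int) : Int :=
  match PySem.Str.pyGet? guess index with
  | none => 0            -- Python raises IndexError here (outside Pre_)
  | some letter =>
    let positions : PySem.Dict Char (List Int) :=
      (PySem.List.enumerate (PySem.List.slice guess.toList none (some (result.toList.length : Int))) 0).foldl
        (fun d p => d.modify p.2 [] (fun l => l ++ [p.1])) PySem.Dict.empty
    (positions.getD letter []).foldl
      (fun c i => if i ≠ index ∧ PySem.List.pyGet? result.toList i ≠ some 'w' then c + 1 else c) 0

-- ===== PRECONDITION & SPEC =====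
-- Exactly where A returns: guess[index] must exist and guess[i] must exist for every
-- position i of result (A skips only i == index, which is already < len(guess)).
def Pre_count_non_w (guess : String) (result : String) (index : Int) : Prop :=
  PySem.Raise.InRange guess.toList.length index ∧ result.toList.length ≤ guess.toList.length
instance (guess : String) (result : String) (index : Int) : Decidable (Pre_count_non_w guess result index) := by unfold Pre_count_non_w; infer_instance

def pvWitness_count_non_w : String × String × Int := ("abba", "bwab", 1)

def Spec_count_non_w (guess : String) (result : String) (index : Int) (out : Int) : Prop := out = count_non_w_alt guess result index
instance (guess : String) (result : String) (index : Int) (out : Int) : Decidable (Spec_count_non_w guess result index out) := by unfold Spec_count_non_w; infer_instance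

-- ===== CLAIM (what is proved, stated in full; the proofs are below) =====
def Claim_equal_count_non_w : Prop := ∀ (guess : String) (result : String) (index : Int), Dom_count_non_w guess result index → Pre_count_non_w guess result index → Spec_count_non_w guess result index (count_non_w guess result index)

-- ===== LEMMAS AND PROOFS =====

theorem count_non_w_eq (guess result : String) (index : Int)
    (hin : PySem.Raise.InRange guess.toList.length index)
    (hle : result.toList.length ≤ guess.toList.length) :
    count_non_w guess result index = count_non_w_alt guess result index := by
  obtain ⟨letter, hlet⟩ : ∃ c, PySem.Str.pyGet? guess index = some c := by
    rcases h : PySem.Str.pyGet? guess index with _ | c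
    · rw [PySem.Str.pyGet?_eq] at h
      exact absurd hin (by simpa [PySem.List.pyGet?_eq_none_iff] using h)
    · exact ⟨c, rfl⟩
  unfold count_non_w count_non_w_alt
  rw [hlet]
  simp only []
  -- abbreviations
  set gl := guess.toList with hgl
  set rl := result.toList with hrl
  -- B's dict bucket for `letter` is the list of positions of `letter` in guess[:len(result)]
  rw [PySem.List.slice_to_natCast gl rl.length]
  have hbucket :
      ((PySem.List.enumerate (gl.take rl.length) 0).foldl
          (fun d p => d.modify p.2 [] (fun l => l ++ [p.1])) PySem.Dict.empty).getD letter [] =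
      (((PySem.List.enumerate (gl.take rl.length) 0).filter (fun p => p.2 == letter)).map (fun p => p.1)) := by
    have hswap : (PySem.List.enumerate (gl.take rl.length) 0).foldl
        (fun d p => d.modify p.2 [] (fun l => l ++ [p.1])) PySem.Dict.empty
      = (((PySem.List.enumerate (gl.take rl.length) 0).map (fun q => (q.2, q.1))).foldl
          (fun (d : PySem.Dict Char (List Int)) p => d.modify p.1 [] (fun l => l ++ [p.2])) PySem.Dict.empty) := by
      rw [List.foldl_map]
    rw [hswap, PySem.Dict.getD_foldl_modify_append]
    simp [List.filter_map, Function.comp_def]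
  rw [hbucket]
  -- A's loop body in if-then-else form
  have stepA : (fun (count : Int) (p : Int × Char) =>
      if p.1 = index then count
      else match PySem.List.pyGet? gl p.1 with
        | none => count
        | some ch => if ch = letter ∧ p.2 ≠ 'w' then count + 1 else count) =
      (fun count p => if p.1 ≠ index ∧ PySem.List.pyGet? gl p.1 = some letter ∧ p.2 ≠ 'w'
                      then count + 1 else count) := by
    funext c p
    by_cases hpi : p.1 = index
    · simp [hpi]
    · rcases h : PySem.List.pyGet? gl p.1 with _ | ch
      · simp [hpi]
      · by_cases h1 : ch = letter <;> by_cases h2 : p.2 = 'w' <;> simp [hpi, h1, h2]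
  rw [stepA, PySem.List.foldl_ite_add_one, PySem.List.foldl_ite_add_one]
  -- both sides are now countP's; turn B's filter/map into one countP
  rw [List.countP_map, List.countP_filter]
  -- express both enumerates over the common index range
  have hlen : (gl.take rl.length).length = rl.length := by
    simp [List.length_take, Nat.min_eq_left hle]
  rw [PySem.List.enumerate_eq_map_pyRange rl '?', PySem.List.enumerate_eq_map_pyRange (gl.take rl.length) '?',
    List.countP_map, List.countP_map]
  simp only [PySem.List.len, hlen]
  simp only [zero_add, Nat.cast_inj]
  apply List.countP_congr
  intro j hj
  obtain ⟨hj0, hjN⟩ := PySem.List.mem_pyRange_one.mp hj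
  have hk : j.toNat < rl.length := by omega
  have hkg : j.toNat < gl.length := by omega
  have e1 : PySem.List.pyGet? gl j = some gl[j.toNat] := by
    rw [PySem.List.pyGet?_of_nonneg gl hj0, List.getElem?_eq_getElem hkg]
  have e2 : PySem.List.pyGet? rl j = some rl[j.toNat] := by
    rw [PySem.List.pyGet?_of_nonneg rl hj0, List.getElem?_eq_getElem hk]
  have e3 : PySem.List.pyGetD rl j '?' = rl[j.toNat] := by
    rw [PySem.List.pyGetD_of_nonneg rl '?' hj0, List.getD_eq_getElem rl '?' hk]
  have e4 : PySem.List.pyGetD (gl.take rl.length) j '?' = gl[j.toNat] := by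
    rw [PySem.List.pyGetD_of_nonneg (gl.take rl.length) '?' hj0,
      List.getD_eq_getElem (gl.take rl.length) '?' (by omega), List.getElem_take]
  simp only [Function.comp_def, e1, e2, e3, e4, Bool.and_eq_true, decide_eq_true_eq, beq_iff_eq,
    Option.some.injEq]
  simp only [ne_eq, Option.some.injEq]
  tauto

-- ===== VERDICT (by name: the statement is the Claim_ definition above) =====
theorem count_non_w_spec : Claim_equal_count_non_w := by
  intro guess result index _ hpre
  unfold Spec_count_non_w
  exact count_non_w_eq guess result index hpre.1 hpre.2
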